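-- pv_equiv track=rewrite | github.com/Tehlikeli107/gpu-semigroup | quasigroup_counting.py | rich_invariants
-- ===== SOURCE A (Python) =====
-- def rich_invariants(op_flat, n):
--     """
--     Polynomial-time counting invariants for quasigroups.
--     These are PARASTROPHE-INVARIANT (same for parastrophically related quasigroups).
--     """
--     op = [[op_flat[i * n + j] for j in range(n)] for i in range(n)]
--
--     # 1. Commutativity count
--     comm = sum(op[i][j] == op[j][i] for i in range(n) for j in range(n))
--     # 2. Idempotent count: #{a: a*a=a}
--     idemp = sum(op[i][i] == i for i in range(n))
--     # 3. Square image size: |{a*a: a in Q}|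
--     sq_img = len(set(op[i][i] for i in range(n)))
--     # 4. Center size: #{a: a*b=b*a for all b}
--     center = sum(all(op[i][j] == op[j][i] for j in range(n)) for i in range(n))
--     # 5. Steiner count: #{(a,b): (a*b)*a = b}
--     steiner = sum(op[op[i][j]][i] == j for i in range(n) for j in range(n))
--     # 6. Element period histogram
--     periods = []
--     for a in range(n):
--         cur = a
--         seen = {}
--         step = 0
--         while cur not in seen:
--             seen[cur] = step
--             cur = op[cur][a]
--             step += 1
--         periods.append(step - seen[cur])
--     period_hist = tuple(sorted(periods))
--     # 7. Row fixed-point distribution (sorted = parastrophe-invariant)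
--     row_fp = tuple(sorted(sum(op[i][j] == j for j in range(n)) for i in range(n)))
--     # 8. Col fixed-point distribution (sorted)
--     col_fp = tuple(sorted(sum(op[i][j] == j for i in range(n)) for j in range(n)))
--
--     return (comm, idemp, sq_img, center, steiner) + period_hist + row_fp + col_fp
-- ===== SOURCE B (Python) =====
-- def rich_invariants(op_flat, n):
--     # Slice/zip decomposition: build the rows as slices and the columns via
--     # zip(*rows); compare whole rows to columns (center), count with list.count
--     # (column fixed points), and measure each element's period by first walking
--     # n steps into the cycle and then timing one full return trip (no dict).
--     size = n * n
--     table = op_flat[:size]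
--     rows = [table[i * n:(i + 1) * n] for i in range(n)]
--     cols = [list(c) for c in zip(*rows)]
--     diag = [r[i] for i, r in enumerate(rows)]
--
--     comm = sum(v == w for r, c in zip(rows, cols) for v, w in zip(r, c))
--     idemp = sum(d == i for i, d in enumerate(diag))
--     sq_img = len(set(diag))
--     center = sum(r == c for r, c in zip(rows, cols))
--     steiner = sum(c[v] == j for r, c in zip(rows, cols) for j, v in enumerate(r))
--
--     periods = []
--     for a in range(n):
--         col = cols[a]
--         cur = a
--         for _ in range(n):          # after n steps cur is inside its cycle
--             cur = col[cur]
--         anchor = cur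
--         p = 1
--         cur = col[anchor]
--         while cur != anchor:        # one full trip around the cycle
--             cur = col[cur]
--             p += 1
--         periods.append(p)
--
--     row_fp = sorted(sum(v == j for j, v in enumerate(r)) for r in rows)
--     col_fp = sorted(c.count(j) for j, c in enumerate(cols))
--     return (comm, idemp, sq_img, center, steiner) \
--         + tuple(sorted(periods)) + tuple(row_fp) + tuple(col_fp)
-- ===== Notes on version B (the rewrite author's own statement) =====
-- stated objective: alternative
-- what changed: B slices the flat table into row lists and builds the columns once via zip(*rows), then computes commutativity/steiner cellwise over zipped rows and columns, the center by whole-row-equals-column list comparisons, column fixed points with list.count, and each element's period by walking n steps into its cycle and timing one full lap (two pointers, O(1) extra memory) instead of A's per-step position dictionary.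
import Mathlib
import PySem

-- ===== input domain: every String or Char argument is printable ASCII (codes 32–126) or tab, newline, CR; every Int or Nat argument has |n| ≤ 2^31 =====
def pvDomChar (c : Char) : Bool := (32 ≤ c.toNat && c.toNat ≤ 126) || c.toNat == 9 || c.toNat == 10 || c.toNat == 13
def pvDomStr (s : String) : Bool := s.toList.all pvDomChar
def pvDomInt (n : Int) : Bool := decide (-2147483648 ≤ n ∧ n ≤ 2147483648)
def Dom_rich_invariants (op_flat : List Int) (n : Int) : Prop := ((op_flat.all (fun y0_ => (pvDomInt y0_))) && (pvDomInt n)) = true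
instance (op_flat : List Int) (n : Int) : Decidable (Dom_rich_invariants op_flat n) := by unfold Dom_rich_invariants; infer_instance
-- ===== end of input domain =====

-- B re-decomposes the computation around row slices and zip(*rows) columns (whole-row
-- comparisons, list.count, and a walk-in-then-time-one-lap period algorithm with no
-- dictionary); objective: alternative decomposition, same asymptotic cost.

-- ===== PORT A =====
-- op = [[op_flat[i*n+j] for j in range(n)] for i in range(n)]
def pvOpMat (op_flat : List Int) (n : Int) : List (List Int) :=
  (PySem.List.pyRange 0 n 1).map (fun i =>
    (PySem.List.pyRange 0 n 1).map (fun j => PySem.List.pyGetD op_flat (i * n + j) 0))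

-- op[i][j]; pyGetD is exact wherever the Python indexing succeeds (Pre_ keeps indices in range)
def pvGetA (op : List (List Int)) (i j : Int) : Int :=
  PySem.List.pyGetD (PySem.List.pyGetD op i []) j 0

-- the 'while cur not in seen' loop of A; fuel 2n+2 suffices under Pre_ (every state is a
-- table value in [-n, n), and each iteration inserts a fresh one)
def pvPeriodLoopA (op : List (List Int)) (a : Int) :
    Nat → Int → PySem.Dict Int Int → Int → Int
  | 0, _, _, _ => 0
  | fuel + 1, cur, seen, step =>
    if seen.contains cur then step - seen.getD cur 0
    else pvPeriodLoopA op a fuel (pvGetA op cur a) (seen.insert cur step) (step + 1)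

def rich_invariants (op_flat : List Int) (n : Int) : List Int :=
  let op := pvOpMat op_flat n
  let R := PySem.List.pyRange 0 n 1
  let comm := R.foldl (fun acc i => R.foldl (fun acc j =>
      acc + (if pvGetA op i j = pvGetA op j i then 1 else 0)) acc) 0
  let idemp := R.foldl (fun acc i => acc + (if pvGetA op i i = i then 1 else 0)) 0
  let sq_img : Int := ((PySem.Set.ofList (R.map (fun i => pvGetA op i i))).length : Int)
  let center := R.foldl (fun acc i =>
      acc + (if R.all (fun j => pvGetA op i j == pvGetA op j i) then 1 else 0)) 0
  let steiner := R.foldl (fun acc i => R.foldl (fun acc j =>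
      acc + (if pvGetA op (pvGetA op i j) i = j then 1 else 0)) acc) 0
  let periods := R.foldl (fun acc a =>
      acc ++ [pvPeriodLoopA op a (2 * n.toNat + 2) a PySem.Dict.empty 0]) []
  let period_hist := PySem.List.sorted periods (fun x => x) false
  let row_fp := PySem.List.sorted (R.map (fun i =>
      R.foldl (fun acc j => acc + (if pvGetA op i j = j then 1 else 0)) 0)) (fun x => x) false
  let col_fp := PySem.List.sorted (R.map (fun j =>
      R.foldl (fun acc i => acc + (if pvGetA op i j = j then 1 else 0)) 0)) (fun x => x) false
  [comm, idemp, sq_img, center, steiner] ++ period_hist ++ row_fp ++ col_fp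

-- ===== PORT B =====
-- table = op_flat[:n*n]; rows = [table[i*n:(i+1)*n] for i in range(n)]
def pvRowsB (op_flat : List Int) (n : Int) : List (List Int) :=
  (PySem.List.pyRange 0 n 1).map (fun i =>
    PySem.List.slice (PySem.List.slice op_flat none (some (n * n)))
      (some (i * n)) (some ((i + 1) * n)))

-- zip(*rows): truncates to the shortest row, like Python's zip
def pvMinLen : List (List Int) → Nat
  | [] => 0
  | [r] => r.length
  | r :: rs => min r.length (pvMinLen rs)

def pvZipCols (rows : List (List Int)) : List (List Int) :=
  (List.range (pvMinLen rows)).map (fun j => rows.map (fun r => r.getD j 0))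

-- 'p = 1; cur = col[anchor]; while cur != anchor: cur = col[cur]; p += 1';
-- fuel n+1 suffices under Pre_ (the cycle has length at most n)
def pvRetLoopB (col : List Int) (anchor : Int) : Nat → Int → Int → Int
  | 0, _, p => p
  | fuel + 1, cur, p =>
    if cur = anchor then p
    else pvRetLoopB col anchor fuel (PySem.List.pyGetD col cur 0) (p + 1)

def rich_invariants_alt (op_flat : List Int) (n : Int) : List Int :=
  let rows := pvRowsB op_flat n
  let cols := pvZipCols rows
  let diag := (PySem.List.enumerate rows 0).map (fun p => PySem.List.pyGetD p.2 p.1 0)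
  let comm := (rows.zip cols).foldl (fun acc rc =>
      (rc.1.zip rc.2).foldl (fun acc vw => acc + (if vw.1 = vw.2 then (1 : Int) else 0)) acc) 0
  let idemp := (PySem.List.enumerate diag 0).foldl (fun acc p =>
      acc + (if p.2 = p.1 then (1 : Int) else 0)) 0
  let sq_img : Int := ((PySem.Set.ofList diag).length : Int)
  let center := (rows.zip cols).foldl (fun acc rc =>
      acc + (if rc.1 = rc.2 then (1 : Int) else 0)) 0
  let steiner := (rows.zip cols).foldl (fun acc rc =>
      (PySem.List.enumerate rc.1 0).foldl (fun acc jv =>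
        acc + (if PySem.List.pyGetD rc.2 jv.2 0 = jv.1 then (1 : Int) else 0)) acc) 0
  let periods := (PySem.List.pyRange 0 n 1).foldl (fun acc a =>
      let col := PySem.List.pyGetD cols a []
      let anchor := (PySem.List.pyRange 0 n 1).foldl (fun cur _ => PySem.List.pyGetD col cur 0) a
      acc ++ [pvRetLoopB col anchor (n.toNat + 1) (PySem.List.pyGetD col anchor 0) 1]) []
  let row_fp := PySem.List.sorted (rows.map (fun r =>
      (PySem.List.enumerate r 0).foldl (fun acc jv =>
        acc + (if jv.2 = jv.1 then (1 : Int) else 0)) 0)) (fun x => x) false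
  let col_fp := PySem.List.sorted ((PySem.List.enumerate cols 0).map (fun p =>
      ((PySem.List.count p.2 p.1 : Nat) : Int))) (fun x => x) false
  [comm, idemp, sq_img, center, steiner] ++ PySem.List.sorted periods (fun x => x) false ++
    row_fp ++ col_fp

-- ===== PRECONDITION & SPEC =====
-- Pre_ excludes exactly the inputs where A raises an IndexError: a table shorter than n*n,
-- or a table entry outside [-n, n) (used as a row index by the Steiner and period scans).
def Pre_rich_invariants (op_flat : List Int) (n : Int) : Prop :=
  n < 0 ∨
  (0 ≤ n ∧ n * n ≤ (op_flat.length : Int) ∧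
    ∀ v ∈ op_flat.take (n * n).toNat, -n ≤ v ∧ v < n)

instance (op_flat : List Int) (n : Int) : Decidable (Pre_rich_invariants op_flat n) := by
  unfold Pre_rich_invariants; infer_instance

def pvWitness_rich_invariants : List Int × Int := ([0, 1, 1, 0], 2)

def Spec_rich_invariants (op_flat : List Int) (n : Int) (out : List Int) : Prop :=
  out = rich_invariants_alt op_flat n
instance (op_flat : List Int) (n : Int) (out : List Int) : Decidable (Spec_rich_invariants op_flat n out) := by
  unfold Spec_rich_invariants; infer_instance

-- ===== CLAIM (what is proved, stated in full; the proofs are below) =====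
def Claim_equal_rich_invariants : Prop := ∀ (op_flat : List Int) (n : Int),
  Dom_rich_invariants op_flat n → Pre_rich_invariants op_flat n →
  Spec_rich_invariants op_flat n (rich_invariants op_flat n)

-- ===== LEMMAS AND PROOFS =====

-- Python's negative indexing: xs[i] for -len <= i < 0 is xs[len + i]
lemma pvGetD_neg_shift {α : Type} (xs : List α) (i : Int) (d : α)
    (h1 : -(xs.length : Int) ≤ i) (h2 : i < 0) :
    PySem.List.pyGetD xs i d = PySem.List.pyGetD xs ((xs.length : Int) + i) d := by
  unfold PySem.List.pyGetD PySem.List.pyGet? PySem.List.pyIdx?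
  rw [if_neg (by omega), if_pos h1, if_pos (by omega), if_pos (by omega)]
  have : xs.length - (-i).toNat = ((xs.length : Int) + i).toNat := by omega
  rw [this]

-- xs[i] out of range is the default (Python would raise; Pre_ excludes such reads)
lemma pvGetD_out {α : Type} (xs : List α) (i : Int) (d : α)
    (h : ¬ PySem.Raise.InRange xs.length i) : PySem.List.pyGetD xs i d = d := by
  unfold PySem.Raise.InRange at h
  unfold PySem.List.pyGetD PySem.List.pyGet? PySem.List.pyIdx?
  push Not at h
  by_cases h0 : 0 ≤ i
  · rw [if_pos h0, if_neg (by intro hlt; omega)]; rfl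
  · rw [if_neg h0, if_neg (by intro hle; omega)]; rfl

-- matrix access with nonnegative indices is flat access
lemma pvGetA_nonneg (op_flat : List Int) (n i j : Int)
    (hi0 : 0 ≤ i) (hin : i < n) (hj0 : 0 ≤ j) (hjn : j < n) :
    pvGetA (pvOpMat op_flat n) i j = PySem.List.pyGetD op_flat (i * n + j) 0 := by
  unfold pvGetA pvOpMat
  rw [PySem.List.pyGetD_map_pyRange_of_nonneg _ n i _ hi0 hin,
      PySem.List.pyGetD_map_pyRange_of_nonneg _ n j _ hj0 hjn]

-- a cell addressed by in-range nonnegative indices is among the first n*n entries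
lemma pvCell_mem_nonneg (op_flat : List Int) (n i j : Int)
    (hn : 0 ≤ n) (hlen : n * n ≤ (op_flat.length : Int))
    (hi0 : 0 ≤ i) (hin : i < n) (hj0 : 0 ≤ j) (hjn : j < n) :
    PySem.List.pyGetD op_flat (i * n + j) 0 ∈ op_flat.take (n * n).toNat := by
  have hidx0 : 0 ≤ i * n + j := by positivity
  have hidxlt : i * n + j < n * n := by nlinarith
  have hlt : i * n + j < (op_flat.length : Int) := lt_of_lt_of_le hidxlt hlen
  rw [PySem.List.pyGetD_eq_getElem op_flat 0 hidx0 hlt]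
  have hmin : (i * n + j).toNat < (op_flat.take (n * n).toNat).length := by
    simp only [List.length_take]
    omega
  have hmem := List.getElem_mem hmin
  rwa [List.getElem_take] at hmem

-- the rows B slices out of the flat table are the rows of A's matrix
lemma pvRow_slice_eq (op_flat : List Int) (n i : Int)
    (hn : 0 < n) (hlen : n * n ≤ (op_flat.length : Int)) (hi0 : 0 ≤ i) (hin : i < n) :
    PySem.List.slice (PySem.List.slice op_flat none (some (n * n)))
      (some (i * n)) (some ((i + 1) * n))
    = (PySem.List.pyRange 0 n 1).map (fun j => PySem.List.pyGetD op_flat (i * n + j) 0) := by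
  have hin0 : 0 ≤ i * n := by positivity
  have hsum : (i + 1) * n = i * n + n := by ring
  have hup : i * n + n ≤ n * n := by nlinarith
  rw [hsum, PySem.List.slice_to op_flat (by positivity),
      PySem.List.slice_toNat _ hin0 (by omega)]
  apply List.ext_getElem
  · simp only [List.length_take, List.length_drop, List.length_map,
      PySem.List.length_pyRange_one]
    omega
  · intro k h1 h2
    simp only [List.length_take, List.length_drop] at h1
    have hk : k < n.toNat := by
      simp only [List.length_map, PySem.List.length_pyRange_one] at h2
      omega
    rw [List.getElem_take, List.getElem_drop, List.getElem_take, List.getElem_map,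
        PySem.List.getElem_pyRange_one]
    have hkn : (k : Int) < n := by omega
    have hidx0 : 0 ≤ i * n + (0 + (k : Int)) := by omega
    have hidxlt : i * n + (0 + (k : Int)) < (op_flat.length : Int) := by omega
    rw [PySem.List.pyGetD_eq_getElem op_flat 0 hidx0 hidxlt]
    congr 1
    omega

lemma pvRowsB_eq (op_flat : List Int) (n : Int)
    (hn : 0 < n) (hlen : n * n ≤ (op_flat.length : Int)) :
    pvRowsB op_flat n = (PySem.List.pyRange 0 n 1).map (fun i =>
      (PySem.List.pyRange 0 n 1).map (fun j => pvGetA (pvOpMat op_flat n) i j)) := by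
  unfold pvRowsB
  apply List.map_congr_left
  intro i hi
  obtain ⟨hi0, hin⟩ := PySem.List.mem_pyRange_one.mp hi
  rw [pvRow_slice_eq op_flat n i hn hlen hi0 hin]
  apply List.map_congr_left
  intro j hj
  obtain ⟨hj0, hjn⟩ := PySem.List.mem_pyRange_one.mp hj
  rw [pvGetA_nonneg op_flat n i j hi0 hin hj0 hjn]

lemma pvMinLen_const (L : Nat) : ∀ (l : List (List Int)), l ≠ [] →
    (∀ r ∈ l, r.length = L) → pvMinLen l = L := by
  intro l
  induction l with
  | nil => intro h _; exact absurd rfl h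
  | cons r rs ih =>
    intro _ hall
    cases rs with
    | nil => exact hall r (by simp)
    | cons r2 t =>
      show min r.length (pvMinLen (r2 :: t)) = L
      rw [hall r (by simp), ih (by simp) (fun x hx => hall x (List.mem_cons_of_mem _ hx))]
      exact min_self L

lemma pvZipCols_eq (op_flat : List Int) (n : Int)
    (hn : 0 < n) (hlen : n * n ≤ (op_flat.length : Int)) :
    pvZipCols (pvRowsB op_flat n) = (PySem.List.pyRange 0 n 1).map (fun j =>
      (PySem.List.pyRange 0 n 1).map (fun i => pvGetA (pvOpMat op_flat n) i j)) := by
  rw [pvRowsB_eq op_flat n hn hlen]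
  have hlenrow : ∀ r ∈ (PySem.List.pyRange 0 n 1).map (fun i =>
      (PySem.List.pyRange 0 n 1).map (fun j => pvGetA (pvOpMat op_flat n) i j)),
      r.length = n.toNat := by
    intro r hr
    obtain ⟨i, _, rfl⟩ := List.mem_map.mp hr
    simp [PySem.List.length_pyRange_one]
  have hne : (PySem.List.pyRange 0 n 1).map (fun i =>
      (PySem.List.pyRange 0 n 1).map (fun j => pvGetA (pvOpMat op_flat n) i j)) ≠ [] := by
    apply List.ne_nil_of_length_pos
    simp only [List.length_map, PySem.List.length_pyRange_one]
    omega
  unfold pvZipCols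
  rw [pvMinLen_const n.toNat _ hne hlenrow]
  apply List.ext_getElem
  · simp only [List.length_map, List.length_range, PySem.List.length_pyRange_one]
    omega
  · intro k h1 h2
    have hkn : k < n.toNat := by
      simpa only [List.length_map, List.length_range] using h1
    simp only [List.getElem_map, List.getElem_range, PySem.List.getElem_pyRange_one]
    rw [List.map_map]
    apply List.map_congr_left
    intro i hi
    obtain ⟨hi0, hin⟩ := PySem.List.mem_pyRange_one.mp hi
    have hklen : k < ((PySem.List.pyRange 0 n 1).map
        (fun j => pvGetA (pvOpMat op_flat n) i j)).length := by
      simp only [List.length_map, PySem.List.length_pyRange_one]; omega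
    simp only [Function.comp]
    rw [List.getD_eq_getElem _ 0 hklen, List.getElem_map, PySem.List.getElem_pyRange_one]

-- enumerate over a range comprehension pairs each index with its value
lemma pvEnumMapR {β : Type} (n : Int) (hn : 0 ≤ n) (G : Int → β) (d : β) :
    PySem.List.enumerate ((PySem.List.pyRange 0 n 1).map G) 0
    = (PySem.List.pyRange 0 n 1).map (fun i => (i, G i)) := by
  rw [PySem.List.enumerate_eq_map_pyRange _ d]
  have hl : PySem.List.len ((PySem.List.pyRange 0 n 1).map G) = n := by
    rw [PySem.List.len_eq]
    simp only [List.length_map, PySem.List.length_pyRange_one]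
    omega
  rw [hl]
  apply List.map_congr_left
  intro j hj
  obtain ⟨hj0, hjn⟩ := PySem.List.mem_pyRange_one.mp hj
  rw [PySem.List.pyGetD_map_pyRange_of_nonneg G n j d hj0 hjn]

-- a length-n column list read at any Int index agrees with A's wrapped matrix access
lemma pvColGet_eq (op_flat : List Int) (n a : Int)
    (hn : 0 < n) (x : Int) :
    PySem.List.pyGetD ((PySem.List.pyRange 0 n 1).map
      (fun i => pvGetA (pvOpMat op_flat n) i a)) x 0
    = pvGetA (pvOpMat op_flat n) x a := by
  have hcl : (((PySem.List.pyRange 0 n 1).map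
      (fun i => pvGetA (pvOpMat op_flat n) i a)).length : Int) = n := by
    simp only [List.length_map, PySem.List.length_pyRange_one]
    omega
  have hol : (((pvOpMat op_flat n)).length : Int) = n := by
    unfold pvOpMat
    simp only [List.length_map, PySem.List.length_pyRange_one]
    omega
  rcases (by omega : (0 ≤ x ∧ x < n) ∨ (-n ≤ x ∧ x < 0) ∨ (x < -n ∨ n ≤ x)) with h | h | h
  · rw [PySem.List.pyGetD_map_pyRange_of_nonneg _ n x 0 h.1 h.2]
  · rw [pvGetD_neg_shift _ x 0 (by omega) h.2, hcl,
        PySem.List.pyGetD_map_pyRange_of_nonneg _ n (n + x) 0 (by omega) (by omega)]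
    unfold pvGetA
    rw [pvGetD_neg_shift (pvOpMat op_flat n) x [] (by rw [hol]; omega) h.2, hol]
  · rw [pvGetD_out _ x 0 (by unfold PySem.Raise.InRange; omega)]
    unfold pvGetA
    rw [pvGetD_out _ x [] (by unfold PySem.Raise.InRange; omega)]
    rw [pvGetD_out ([] : List Int) a 0 (by unfold PySem.Raise.InRange; simp)]

-- ----- the period computation -----

-- the step function both period loops iterate
def pvG (col : List Int) : Int → Int := fun x => PySem.List.pyGetD col x 0

-- proof-side mirror of A's dict loop with the dict replaced by its key list
def pvTrail (g : Int → Int) : Nat → Int → List Int → Int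
  | 0, _, _ => 0
  | fuel + 1, cur, trail =>
    if trail.contains cur then
      (trail.length : Int) - (((PySem.List.index? trail cur).getD 0 : Nat) : Int)
    else pvTrail g fuel (g cur) (trail ++ [cur])

-- the dictionary A builds in its period loop, expressed from a trail list
def pvDictOf (t : List Int) : PySem.Dict Int Int :=
  PySem.Dict.mk ((PySem.List.enumerate t 0).map (fun p => (p.2, p.1)))

lemma pvGet?_dictOf_aux (t : List Int) : ∀ (s x : Int),
    (PySem.Dict.mk ((PySem.List.enumerate t s).map (fun p => (p.2, p.1)))).get? x
    = (PySem.List.index? t x).map (fun k => s + (k : Int)) := by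
  induction t with
  | nil =>
    intro s x
    simp [PySem.List.enumerate_nil, PySem.List.index?_eq_idxOf?]
    rfl
  | cons y t ih =>
    intro s x
    rw [PySem.List.enumerate_cons]
    simp only [List.map_cons]
    rw [PySem.Dict.get?_mk_cons]
    by_cases hxy : y = x
    · subst hxy
      rw [if_pos (by simp), PySem.List.index?_cons_self]
      simp
    · rw [if_neg (by simp [hxy]), ih, PySem.List.index?_cons_of_ne t hxy]
      cases PySem.List.index? t x <;> (simp; try ring)

lemma pvGet?_dictOf (t : List Int) (x : Int) :
    (pvDictOf t).get? x = (PySem.List.index? t x).map (fun k => (k : Int)) := by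
  rw [pvDictOf, pvGet?_dictOf_aux]
  cases PySem.List.index? t x <;> simp

lemma pvContains_dictOf (t : List Int) (x : Int) :
    (pvDictOf t).contains x = t.contains x := by
  rw [PySem.Dict.contains_eq_isSome_get?, pvGet?_dictOf]
  cases h : PySem.List.index? t x
  · simp [(PySem.List.index?_eq_none_iff t x).mp h]
  · have : x ∈ t := (PySem.List.index?_isSome_iff t x).mp (by rw [h]; rfl)
    simp [this]

lemma pvDictOf_append (t : List Int) (x : Int) (hx : x ∉ t) :
    (pvDictOf t).insert x (t.length : Int) = pvDictOf (t ++ [x]) := by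
  apply PySem.Dict.ext
  have hnc : (pvDictOf t).contains x = false := by
    rw [pvContains_dictOf]
    simp [hx]
  rw [PySem.Dict.items_insert_of_not_contains _ _ hnc]
  show (pvDictOf t).items ++ [(x, (t.length : Int))]
      = (PySem.List.enumerate (t ++ [x]) 0).map (fun p => (p.2, p.1))
  rw [PySem.List.enumerate_append]
  simp [pvDictOf, PySem.List.enumerate_cons, PySem.List.enumerate_nil]

-- A's dict loop is the trail loop
lemma pvDict_eq_trail (op : List (List Int)) (a : Int) : ∀ (fuel : Nat) (cur : Int) (trail : List Int),
    pvPeriodLoopA op a fuel cur (pvDictOf trail) (trail.length : Int)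
    = pvTrail (fun x => pvGetA op x a) fuel cur trail := by
  intro fuel
  induction fuel with
  | zero => intro cur trail; rfl
  | succ fuel ih =>
    intro cur trail
    rw [pvPeriodLoopA, pvTrail, pvContains_dictOf]
    by_cases hmem : cur ∈ trail
    · rw [if_pos (List.contains_iff_mem.mpr hmem), if_pos (List.contains_iff_mem.mpr hmem)]
      rw [PySem.Dict.getD_eq_get?_getD, pvGet?_dictOf]
      obtain ⟨k, hk⟩ : ∃ k, PySem.List.index? trail cur = some k := by
        have := (PySem.List.index?_isSome_iff trail cur).mpr hmem
        exact Option.isSome_iff_exists.mp this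
      rw [hk]; simp
    · rw [if_neg (by simp [hmem]), if_neg (by simp [hmem])]
      rw [pvDictOf_append trail cur hmem]
      have hlen : (trail.length : Int) + 1 = ((trail ++ [cur]).length : Int) := by
        simp [List.length_append]
      rw [hlen]
      exact ih _ _

-- a loop that applies g and ignores the loop variable is iteration
lemma pvFoldl_iterate {α : Type} (g : Int → Int) (l : List α) (x : Int) :
    l.foldl (fun cur _ => g cur) x = g^[l.length] x := by
  induction l generalizing x with
  | nil => rfl
  | cons y t ih => simp only [List.foldl_cons, List.length_cons]
                   rw [ih, ← Function.iterate_succ_apply]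

-- the trail loop returns T - mu, with T the first repeat and mu its earlier twin
lemma pvTrailRun (g : Int → Int) (a : Int) (T μ : Nat) (hμT : μ < T)
    (hTμ : g^[T] a = g^[μ] a)
    (hinj : ∀ i j, i < T → j < T → g^[i] a = g^[j] a → i = j) :
    ∀ (fuel k : Nat), k ≤ T → T < k + fuel →
    pvTrail g fuel (g^[k] a) ((List.range k).map (fun m => g^[m] a)) = (T : Int) - (μ : Int) := by
  intro fuel
  induction fuel with
  | zero => intro k hk hf; omega
  | succ fuel ih =>
    intro k hk hf
    rw [pvTrail]
    by_cases hkT : k = T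
    · rw [hkT]
      have hmem : g^[T] a ∈ (List.range T).map (fun m => g^[m] a) :=
        List.mem_map.mpr ⟨μ, List.mem_range.mpr hμT, hTμ.symm⟩
      rw [if_pos (List.contains_iff_mem.mpr hmem)]
      have hlist : (List.range T).map (fun m => g^[m] a)
          = (List.range μ).map (fun m => g^[m] a) ++ g^[T] a ::
            (List.range (T - μ - 1)).map (fun i => g^[μ + (i + 1)] a) := by
        conv_lhs => rw [show T = μ + ((T - μ - 1) + 1) by omega]
        rw [List.range_add, List.map_append, List.range_succ_eq_map]
        simp only [List.map_cons, List.map_map, Nat.add_zero]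
        rw [hTμ]
        simp [Function.comp_def, Nat.succ_eq_add_one]
      have hidx : PySem.List.index? ((List.range T).map (fun m => g^[m] a)) (g^[T] a)
          = some μ := by
        rw [PySem.List.index?_eq_some_iff]
        refine ⟨(List.range μ).map (fun m => g^[m] a),
          (List.range (T - μ - 1)).map (fun i => g^[μ + (i + 1)] a), hlist, by simp, ?_⟩
        intro hmem2
        obtain ⟨m, hm, he⟩ := List.mem_map.mp hmem2
        have hmμ : m < μ := List.mem_range.mp hm
        have hmμ2 : g^[m] a = g^[μ] a := by rw [he, hTμ]
        have := hinj m μ (by omega) hμT hmμ2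
        omega
      rw [hidx]
      simp
    · have hklt : k < T := by omega
      have hnot : g^[k] a ∉ (List.range k).map (fun m => g^[m] a) := by
        intro hmem
        obtain ⟨m, hm, he⟩ := List.mem_map.mp hmem
        have hmk : m < k := List.mem_range.mp hm
        have := hinj m k (by omega) hklt he
        omega
      rw [if_neg (fun hc => hnot (List.contains_iff_mem.mp hc))]
      have hstep : g (g^[k] a) = g^[k + 1] a := (Function.iterate_succ_apply' g k a).symm
      have htrail : (List.range k).map (fun m => g^[m] a) ++ [g^[k] a]
          = (List.range (k + 1)).map (fun m => g^[m] a) := by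
        rw [List.range_succ, List.map_append]
        rfl
      rw [hstep, htrail]
      exact ih (k + 1) (by omega) (by omega)

-- the timing loop returns the exact period L of the anchor
lemma pvRetRun (col : List Int) (b : Int) (L : Nat)
    (hper : (pvG col)^[L] b = b)
    (hmin : ∀ p : Nat, 0 < p → p < L → (pvG col)^[p] b ≠ b) :
    ∀ (fuel q : Nat), 0 < q → q ≤ L → L < q + fuel →
    pvRetLoopB col b fuel ((pvG col)^[q] b) (q : Int) = (L : Int) := by
  intro fuel
  induction fuel with
  | zero => intro q h1 h2 h3; omega
  | succ fuel ih =>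
    intro q h1 h2 h3
    rw [pvRetLoopB]
    by_cases he : (pvG col)^[q] b = b
    · rw [if_pos he]
      have hq : q = L := by
        by_contra hne
        exact hmin q h1 (by omega) he
      rw [hq]
    · rw [if_neg he]
      have hqL : q < L := by
        rcases eq_or_lt_of_le h2 with h | h
        · exact absurd (by rw [h]; exact hper) he
        · exact h
      have hstep : PySem.List.pyGetD col ((pvG col)^[q] b) 0 = (pvG col)^[q + 1] b := by
        rw [Function.iterate_succ_apply']
        rfl
      have hcast : (q : Int) + 1 = ((q + 1 : Nat) : Int) := by push_cast; ring
      rw [hstep, hcast]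
      exact ih (q + 1) (by omega) (by omega) (by omega)

-- existence of the first repeat, with its pigeonhole bounds
lemma pvCycleExists (col : List Int) (a : Int)
    (hb : ∀ v ∈ col, PySem.Raise.InRange col.length v)
    (ha : PySem.Raise.InRange col.length a) :
    ∃ T μ : Nat, μ < T ∧ T ≤ col.length + 1 ∧ T - μ ≤ col.length ∧
      (pvG col)^[T] a = (pvG col)^[μ] a ∧
      (∀ i j, i < T → j < T → (pvG col)^[i] a = (pvG col)^[j] a → i = j) := by
  have hXin : ∀ k, PySem.Raise.InRange col.length ((pvG col)^[k] a) := by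
    intro k
    induction k with
    | zero => exact ha
    | succ k ihk =>
      refine hb _ ?_
      rw [Function.iterate_succ_apply']
      exact PySem.List.pyGetD_mem col 0 ihk
  have hXmem : ∀ k, (pvG col)^[k + 1] a ∈ col := by
    intro k
    rw [Function.iterate_succ_apply']
    exact PySem.List.pyGetD_mem col 0 (hXin k)
  have hcard : ∀ (m : Nat), (∀ i j, i < m → j < m →
      (pvG col)^[i + 1] a = (pvG col)^[j + 1] a → i = j) → m ≤ col.length := by
    intro m hm
    have hnd : ((List.range m).map (fun i => (pvG col)^[i + 1] a)).Nodup := by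
      refine List.Nodup.map_on ?_ List.nodup_range
      intro i hi j hj he
      exact hm i j (List.mem_range.mp hi) (List.mem_range.mp hj) he
    have hsub : ((List.range m).map (fun i => (pvG col)^[i + 1] a)).toFinset ⊆ col.toFinset := by
      intro x hx
      rw [List.mem_toFinset] at hx ⊢
      obtain ⟨i, _, rfl⟩ := List.mem_map.mp hx
      exact hXmem i
    calc m = ((List.range m).map (fun i => (pvG col)^[i + 1] a)).length := by simp
      _ = ((List.range m).map (fun i => (pvG col)^[i + 1] a)).toFinset.card :=
            (List.toFinset_card_of_nodup hnd).symm
      _ ≤ col.toFinset.card := Finset.card_le_card hsub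
      _ ≤ col.length := List.toFinset_card_le col
  have hrep : ∃ N, ∃ m, m < N ∧ (pvG col)^[N] a = (pvG col)^[m] a := by
    by_contra h
    push Not at h
    have hinj1 : ∀ i j, i < col.length + 1 → j < col.length + 1 →
        (pvG col)^[i + 1] a = (pvG col)^[j + 1] a → i = j := by
      intro i j _ _ he
      rcases lt_trichotomy i j with hij | hij | hij
      · exact absurd he.symm (h (j + 1) (i + 1) (by omega))
      · exact hij
      · exact absurd he (h (i + 1) (j + 1) (by omega))
    have := hcard (col.length + 1) hinj1
    omega
  obtain ⟨μ, hμT, hTμ⟩ : ∃ m, m < Nat.find hrep ∧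
      (pvG col)^[Nat.find hrep] a = (pvG col)^[m] a := Nat.find_spec hrep
  have hinj : ∀ i j, i < Nat.find hrep → j < Nat.find hrep →
      (pvG col)^[i] a = (pvG col)^[j] a → i = j := by
    intro i j hi hj he
    rcases lt_trichotomy i j with hij | hij | hij
    · exact absurd ⟨i, hij, he.symm⟩ (Nat.find_min hrep hj)
    · exact hij
    · exact absurd ⟨j, hij, he⟩ (Nat.find_min hrep hi)
  have hTb : Nat.find hrep ≤ col.length + 1 := by
    by_contra hTb
    have := hcard (col.length + 1)
      (fun i j hi hj he => by
        have := hinj (i + 1) (j + 1) (by omega) (by omega) he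
        omega)
    omega
  have hLb : Nat.find hrep - μ ≤ col.length := by
    have hnd : ((List.range (Nat.find hrep - μ)).map (fun i => (pvG col)^[μ + i] a)).Nodup := by
      refine List.Nodup.map_on ?_ List.nodup_range
      intro i hi j hj he
      have hi' := List.mem_range.mp hi
      have hj' := List.mem_range.mp hj
      have := hinj (μ + i) (μ + j) (by omega) (by omega) he
      omega
    have hsubm : ∀ i, i < Nat.find hrep - μ → (pvG col)^[μ + i] a ∈ col := by
      intro i hi
      rcases Nat.eq_zero_or_pos (μ + i) with h0 | hpos
      · have hT1 : Nat.find hrep = (Nat.find hrep - 1) + 1 := by omega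
        rw [h0, show (0 : Nat) = μ by omega, ← hTμ, hT1]
        exact hXmem (Nat.find hrep - 1)
      · obtain ⟨k, hk⟩ := Nat.exists_eq_succ_of_ne_zero (by omega : μ + i ≠ 0)
        rw [hk]
        exact hXmem k
    have hsub : ((List.range (Nat.find hrep - μ)).map
        (fun i => (pvG col)^[μ + i] a)).toFinset ⊆ col.toFinset := by
      intro x hx
      rw [List.mem_toFinset] at hx ⊢
      obtain ⟨i, hi, rfl⟩ := List.mem_map.mp hx
      exact hsubm i (List.mem_range.mp hi)
    calc Nat.find hrep - μ
        = ((List.range (Nat.find hrep - μ)).map (fun i => (pvG col)^[μ + i] a)).length := by simp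
      _ = ((List.range (Nat.find hrep - μ)).map
            (fun i => (pvG col)^[μ + i] a)).toFinset.card := (List.toFinset_card_of_nodup hnd).symm
      _ ≤ col.toFinset.card := Finset.card_le_card hsub
      _ ≤ col.length := List.toFinset_card_le col
  exact ⟨Nat.find hrep, μ, hμT, hTb, hLb, hTμ, hinj⟩

-- both period computations agree: A's dict walk and B's walk-in-then-time-one-lap
lemma pvPeriodMaster (col : List Int) (a : Int)
    (hb : ∀ v ∈ col, PySem.Raise.InRange col.length v)
    (ha : PySem.Raise.InRange col.length a) :
    pvTrail (pvG col) (2 * col.length + 2) a []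
    = pvRetLoopB col ((pvG col)^[col.length] a) (col.length + 1)
        (PySem.List.pyGetD col ((pvG col)^[col.length] a) 0) 1 := by
  obtain ⟨T, μ, hμT, hTb, hLb, hTμ, hinj⟩ := pvCycleExists col a hb ha
  have hLHS : pvTrail (pvG col) (2 * col.length + 2) a []
      = (T : Int) - (μ : Int) := by
    have := pvTrailRun (pvG col) a T μ hμT hTμ hinj (2 * col.length + 2) 0
      (by omega) (by omega)
    simpa using this
  have hper1 : ∀ k, μ ≤ k → (pvG col)^[k + (T - μ)] a = (pvG col)^[k] a := by
    intro k hk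
    induction k, hk using Nat.le_induction with
    | base => rw [show μ + (T - μ) = T by omega]; exact hTμ
    | succ k hk ihk =>
      rw [show k + 1 + (T - μ) = (k + (T - μ)) + 1 by omega,
          Function.iterate_succ_apply', ihk, ← Function.iterate_succ_apply' (pvG col) k a]
  have hperS : ∀ s k, μ ≤ k → (pvG col)^[k + s * (T - μ)] a = (pvG col)^[k] a := by
    intro s
    induction s with
    | zero => intro k hk; simp
    | succ s ihs =>
      intro k hk
      rw [show k + (s + 1) * (T - μ) = (k + s * (T - μ)) + (T - μ) by ring_nf,
          hper1 (k + s * (T - μ)) (by omega), ihs k hk]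
  have hμm : μ ≤ col.length := by omega
  have hmin : ∀ p : Nat, 0 < p → p < T - μ →
      (pvG col)^[p] ((pvG col)^[col.length] a) ≠ (pvG col)^[col.length] a := by
    intro p hp hpL he
    have hNp : (pvG col)^[col.length + p] a = (pvG col)^[col.length] a := by
      rw [show col.length + p = p + col.length by omega, Function.iterate_add_apply]
      exact he
    have hL0 : 0 < T - μ := by omega
    set L := T - μ with hLdef
    set r1 := (col.length - μ) % L with hr1
    set d1 := (col.length - μ) / L with hd1
    set r2 := (col.length - μ + p) % L with hr2
    set d2 := (col.length - μ + p) / L with hd2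
    have e1 : L * d1 + r1 = col.length - μ := Nat.div_add_mod _ _
    have e2 : L * d2 + r2 = col.length - μ + p := Nat.div_add_mod _ _
    have hlt1 : r1 < L := Nat.mod_lt _ hL0
    have hlt2 : r2 < L := Nat.mod_lt _ hL0
    have h1 : (pvG col)^[col.length] a = (pvG col)^[μ + r1] a := by
      conv_lhs => rw [show col.length = (μ + r1) + d1 * L by rw [Nat.mul_comm] at e1; omega]
      exact hperS _ _ (by omega)
    have h2 : (pvG col)^[col.length + p] a = (pvG col)^[μ + r2] a := by
      conv_lhs => rw [show col.length + p = (μ + r2) + d2 * L by rw [Nat.mul_comm] at e2; omega]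
      exact hperS _ _ (by omega)
    have hmods : r2 = r1 := by
      have := hinj (μ + r2) (μ + r1) (by omega) (by omega)
        (by rw [← h2, ← h1, hNp])
      omega
    have hdvd : L ∣ p := by
      have h3 : (col.length - μ) + p ≡ (col.length - μ) + 0 [MOD L] := by
        unfold Nat.ModEq
        simp only [Nat.add_zero]
        rw [← hr1, ← hr2] at *
        omega
      exact (Nat.modEq_zero_iff_dvd).mp (Nat.ModEq.add_left_cancel' (col.length - μ) h3)
    have := Nat.le_of_dvd hp hdvd
    omega
  have hper : (pvG col)^[T - μ] ((pvG col)^[col.length] a) = (pvG col)^[col.length] a := by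
    rw [← Function.iterate_add_apply,
        show (T - μ) + col.length = col.length + (T - μ) by omega]
    exact hper1 col.length hμm
  have hstart : PySem.List.pyGetD col ((pvG col)^[col.length] a) 0
      = (pvG col)^[1] ((pvG col)^[col.length] a) := by
    rw [Function.iterate_one]
    rfl
  have hRHS := pvRetRun col ((pvG col)^[col.length] a) (T - μ) hper hmin
    (col.length + 1) 1 (by omega) (by omega) (by omega)
  rw [hLHS, hstart]
  rw [show ((1 : Nat) : Int) = (1 : Int) from rfl] at hRHS
  rw [hRHS]
  omega

-- a 0/1-accumulating loop counts (Prop-test form of PySem.List.foldl_ite_add_one)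
lemma pvFoldCount (p : Int → Prop) [DecidablePred p] (l : List Int) (a : Int) :
    l.foldl (fun acc x => acc + if p x then 1 else 0) a
    = a + (l.countP (fun x => decide (p x)) : Int) := by
  rw [PySem.List.foldl_add l (fun x => if p x then 1 else 0) a]
  congr 1
  rw [← PySem.List.sum_map_ite_one_zero (fun x => decide (p x)) l]
  congr 1
  apply List.map_congr_left
  intro x _
  by_cases hx : p x <;> simp [hx]

-- cells of A's matrix lie among the first n*n table entries and are in [-n, n)
lemma pvEntry_inrange (op_flat : List Int) (n : Int)
    (hn : 0 < n) (hlen : n * n ≤ (op_flat.length : Int))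
    (hval : ∀ v ∈ op_flat.take (n * n).toNat, -n ≤ v ∧ v < n)
    (i j : Int) (hi0 : 0 ≤ i) (hin : i < n) (hj0 : 0 ≤ j) (hjn : j < n) :
    -n ≤ pvGetA (pvOpMat op_flat n) i j ∧ pvGetA (pvOpMat op_flat n) i j < n := by
  rw [pvGetA_nonneg op_flat n i j hi0 hin hj0 hjn]
  exact hval _ (pvCell_mem_nonneg op_flat n i j (by omega) hlen hi0 hin hj0 hjn)

-- the per-element period values of A and B agree
lemma pvPeriod_elem_eq (op_flat : List Int) (n a : Int)
    (hn : 0 < n) (hlen : n * n ≤ (op_flat.length : Int))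
    (hval : ∀ v ∈ op_flat.take (n * n).toNat, -n ≤ v ∧ v < n)
    (ha0 : 0 ≤ a) (han : a < n) :
    pvPeriodLoopA (pvOpMat op_flat n) a (2 * n.toNat + 2) a PySem.Dict.empty 0
    = pvRetLoopB ((PySem.List.pyRange 0 n 1).map (fun i => pvGetA (pvOpMat op_flat n) i a))
        ((PySem.List.pyRange 0 n 1).foldl (fun cur _ =>
          PySem.List.pyGetD ((PySem.List.pyRange 0 n 1).map
            (fun i => pvGetA (pvOpMat op_flat n) i a)) cur 0) a)
        (n.toNat + 1)
        (PySem.List.pyGetD ((PySem.List.pyRange 0 n 1).map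
            (fun i => pvGetA (pvOpMat op_flat n) i a))
          ((PySem.List.pyRange 0 n 1).foldl (fun cur _ =>
            PySem.List.pyGetD ((PySem.List.pyRange 0 n 1).map
              (fun i => pvGetA (pvOpMat op_flat n) i a)) cur 0) a) 0) 1 := by
  have hclen : ((PySem.List.pyRange 0 n 1).map
      (fun i => pvGetA (pvOpMat op_flat n) i a)).length = n.toNat := by
    simp only [List.length_map, PySem.List.length_pyRange_one]
    omega
  have hb : ∀ v ∈ (PySem.List.pyRange 0 n 1).map (fun i => pvGetA (pvOpMat op_flat n) i a),
      PySem.Raise.InRange ((PySem.List.pyRange 0 n 1).map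
        (fun i => pvGetA (pvOpMat op_flat n) i a)).length v := by
    intro v hv
    obtain ⟨i, hi, rfl⟩ := List.mem_map.mp hv
    obtain ⟨hi0, hin⟩ := PySem.List.mem_pyRange_one.mp hi
    have := pvEntry_inrange op_flat n hn hlen hval i a hi0 hin ha0 han
    unfold PySem.Raise.InRange
    rw [hclen]
    omega
  have ha : PySem.Raise.InRange ((PySem.List.pyRange 0 n 1).map
      (fun i => pvGetA (pvOpMat op_flat n) i a)).length a := by
    unfold PySem.Raise.InRange
    rw [hclen]
    omega
  have hg : pvG ((PySem.List.pyRange 0 n 1).map (fun i => pvGetA (pvOpMat op_flat n) i a))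
      = fun x => pvGetA (pvOpMat op_flat n) x a :=
    funext (fun x => pvColGet_eq op_flat n a hn x)
  have hA : pvPeriodLoopA (pvOpMat op_flat n) a (2 * n.toNat + 2) a PySem.Dict.empty 0
      = pvTrail (pvG ((PySem.List.pyRange 0 n 1).map
          (fun i => pvGetA (pvOpMat op_flat n) i a))) (2 * n.toNat + 2) a [] := by
    rw [hg]
    have := pvDict_eq_trail (pvOpMat op_flat n) a (2 * n.toNat + 2) a []
    simpa [pvDictOf, PySem.List.enumerate_nil] using this
  have hanchor : (PySem.List.pyRange 0 n 1).foldl (fun cur _ =>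
      PySem.List.pyGetD ((PySem.List.pyRange 0 n 1).map
        (fun i => pvGetA (pvOpMat op_flat n) i a)) cur 0) a
      = (pvG ((PySem.List.pyRange 0 n 1).map
          (fun i => pvGetA (pvOpMat op_flat n) i a)))^[n.toNat] a := by
    rw [show (fun (cur : Int) (_ : Int) =>
        PySem.List.pyGetD ((PySem.List.pyRange 0 n 1).map
          (fun i => pvGetA (pvOpMat op_flat n) i a)) cur 0)
      = (fun (cur : Int) (_ : Int) => pvG ((PySem.List.pyRange 0 n 1).map
          (fun i => pvGetA (pvOpMat op_flat n) i a)) cur) from rfl]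
    rw [pvFoldl_iterate, PySem.List.length_pyRange_one]
    congr 1
    omega
  rw [hA, hanchor]
  have := pvPeriodMaster ((PySem.List.pyRange 0 n 1).map
      (fun i => pvGetA (pvOpMat op_flat n) i a)) a hb ha
  rw [hclen] at this
  exact this

-- ===== VERDICT (by name: the statement is the Claim_ definition above) =====
theorem rich_invariants_spec : Claim_equal_rich_invariants := by
  intro op_flat n _ hpre
  unfold Spec_rich_invariants
  rcases (by omega : n ≤ 0 ∨ 0 < n) with hn | hn
  · have hR : PySem.List.pyRange 0 n 1 = [] := PySem.List.pyRange_one_eq_nil (by omega)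
    have hrows : pvRowsB op_flat n = [] := by
      unfold pvRowsB; rw [hR]; rfl
    have hsnil : PySem.List.sorted ([] : List Int) (fun x => x) false = [] :=
      PySem.List.sorted_eq_self_of_pairwise _ _ List.Pairwise.nil
    simp [rich_invariants, rich_invariants_alt, hR, hrows, pvZipCols, pvMinLen,
      PySem.List.enumerate_nil, hsnil]
  · have hlen : n * n ≤ (op_flat.length : Int) := by
      rcases hpre with h | h
      · omega
      · exact h.2.1
    have hval : ∀ v ∈ op_flat.take (n * n).toNat, -n ≤ v ∧ v < n := by
      rcases hpre with h | h
      · omega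
      · exact h.2.2
    simp only [rich_invariants, rich_invariants_alt]
    rw [pvZipCols_eq op_flat n hn hlen, pvRowsB_eq op_flat n hn hlen]
    have hdiag : (PySem.List.enumerate ((PySem.List.pyRange 0 n 1).map (fun i =>
        (PySem.List.pyRange 0 n 1).map (fun j => pvGetA (pvOpMat op_flat n) i j))) 0).map
          (fun p => PySem.List.pyGetD p.2 p.1 0)
        = (PySem.List.pyRange 0 n 1).map (fun i => pvGetA (pvOpMat op_flat n) i i) := by
      rw [pvEnumMapR n (by omega) _ [], List.map_map]
      apply List.map_congr_left
      intro i hi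
      obtain ⟨hi0, hin⟩ := PySem.List.mem_pyRange_one.mp hi
      simp only [Function.comp]
      exact PySem.List.pyGetD_map_pyRange_of_nonneg _ n i 0 hi0 hin
    rw [hdiag]
    simp only [List.zip_map', List.foldl_map, List.map_map]
    refine congrArg₂ (· ++ ·) (congrArg₂ (· ++ ·) (congrArg₂ (· ++ ·) ?_ ?_) ?_) ?_
    · refine congrArg₂ (· :: ·) ?_ (congrArg₂ (· :: ·) ?_ (congrArg₂ (· :: ·) ?_
        (congrArg₂ (· :: ·) ?_ (congrArg₂ (· :: ·) ?_ rfl))))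
      · -- comm
        rfl
      · -- idemp
        rw [pvEnumMapR n (by omega) _ 0, List.foldl_map]
      · -- sq_img
        rfl
      · -- center
        apply PySem.List.foldl_congr_mem
        intro acc i hi
        congr 1
        refine if_congr ?_ rfl rfl
        rw [List.all_eq_true, List.map_inj_left]
        simp [beq_iff_eq]
      · -- steiner
        apply PySem.List.foldl_congr_mem
        intro acc i hi
        obtain ⟨hi0, hin⟩ := PySem.List.mem_pyRange_one.mp hi
        rw [pvEnumMapR n (by omega) _ 0, List.foldl_map]
        apply PySem.List.foldl_congr_mem
        intro acc2 j hj
        rw [pvColGet_eq op_flat n i hn]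
    · -- periods
      refine congrArg (fun l => PySem.List.sorted l (fun x => x) false) ?_
      rw [PySem.List.foldl_append_singleton_eq_map, PySem.List.foldl_append_singleton_eq_map,
        List.nil_append, List.nil_append]
      apply List.map_congr_left
      intro a ha
      obtain ⟨ha0, han⟩ := PySem.List.mem_pyRange_one.mp ha
      rw [PySem.List.pyGetD_map_pyRange_of_nonneg _ n a [] ha0 han]
      exact pvPeriod_elem_eq op_flat n a hn hlen hval ha0 han
    · -- row_fp
      refine congrArg (fun l => PySem.List.sorted l (fun x => x) false) ?_
      apply List.map_congr_left
      intro i hi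
      simp only [Function.comp]
      rw [pvEnumMapR n (by omega) _ 0, List.foldl_map]
    · -- col_fp
      refine congrArg (fun l => PySem.List.sorted l (fun x => x) false) ?_
      rw [pvEnumMapR n (by omega) _ [], List.map_map]
      apply List.map_congr_left
      intro j hj
      simp only [Function.comp]
      rw [pvFoldCount (fun i => pvGetA (pvOpMat op_flat n) i j = j) _ 0, zero_add]
      rw [PySem.List.count_eq, List.count_eq_countP, List.countP_map]
      congr 1
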